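-- pv_equiv track=rewrite | github.com/simonsolnes/advent_of_code | 2023/01.py | find
-- ===== SOURCE A (Python) =====
-- def find(input, strings):
--     result = [None for _ in range(len(input))]
--     for check_str in strings:
--         i = 0
--         while True:
--             idx = input.find(check_str, i)
--             if idx < 0:
--                 break
--             else:
--                 result[idx] = check_str
--                 i = idx + 1
--     return [r for r in result if r]
-- ===== SOURCE B (Python) =====
-- def find(input, strings):
--     # Position-major scan: for each start position, take the first matching
--     # pattern in reversed(strings) (= last-wins of A), in position order.
--     rev = list(reversed(strings))
--     out = []
--     for i in range(len(input)):
--         for s in rev: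
--             if input.startswith(s, i):
--                 out.append(s)
--                 break
--     return out
-- ===== Notes on version B (the rewrite author's own statement) =====
-- stated objective: alternative
-- what changed: Pattern-major repeated str.find with a mutable last-wins array is replaced by a single position-major scan that, at each start index, picks the first matching pattern of reversed(strings) and appends it directly, with no result array.
import Mathlib
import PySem

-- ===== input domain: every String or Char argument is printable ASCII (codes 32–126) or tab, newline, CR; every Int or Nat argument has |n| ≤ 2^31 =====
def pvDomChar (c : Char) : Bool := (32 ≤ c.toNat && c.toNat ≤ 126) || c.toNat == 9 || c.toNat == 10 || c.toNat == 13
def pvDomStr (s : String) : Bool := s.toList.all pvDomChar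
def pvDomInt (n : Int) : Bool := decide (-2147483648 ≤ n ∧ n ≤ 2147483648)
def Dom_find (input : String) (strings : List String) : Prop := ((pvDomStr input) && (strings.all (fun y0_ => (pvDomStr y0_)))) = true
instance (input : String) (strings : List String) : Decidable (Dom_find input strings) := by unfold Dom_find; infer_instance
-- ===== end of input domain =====

-- B replaces A's pattern-major repeated str.find into a mutable last-wins array by a single
-- position-major scan picking, at each index, the first match among reversed(strings); same cost class.

-- ===== PORT A =====
-- A's inner 'while True' loop for one check_str ('idx = input.find(check_str, i)' is written out
-- at each use); `fuel` only makes the recursion structural (i strictly increases each turn, so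
-- `inp.length + 2` turns always suffice); otherwise literal.
def findLoop (inp cs : List Char) (str : String) :
    List (Option String) → Nat → Nat → List (Option String)
  | result, _, 0 => result
  | result, i, fuel+1 =>
    if PySem.Chars.findFrom inp cs (i : Int) none < 0 then result
    else findLoop inp cs str
      (result.set (PySem.Chars.findFrom inp cs (i : Int) none).toNat (some str))
      ((PySem.Chars.findFrom inp cs (i : Int) none).toNat + 1) fuel

def find (input : String) (strings : List String) : List String :=
  -- result = [None for _ in range(len(input))], then the for-loop over strings,
  -- then [r for r in result if r]  ('if r' = r is not None and not the empty string)
  (strings.foldl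
    (fun result check_str =>
      findLoop input.toList check_str.toList check_str result 0 (input.toList.length + 2))
    ((List.range input.toList.length).map (fun _ => none))).filterMap
    (fun r => match r with
      | some s => if s.toList = [] then none else some s
      | none => none)

-- ===== PORT B =====
-- input.startswith(s, i) for 0 ≤ i ≤ len(input) is exactly startswith of the i-dropped tail.
def find_alt (input : String) (strings : List String) : List String :=
  (List.range input.toList.length).filterMap (fun i =>
    strings.reverse.find? (fun s => PySem.Chars.startswith (input.toList.drop i) s.toList))

-- ===== PRECONDITION & SPEC =====
-- Pre_ excludes a '' among strings: there A always raises IndexError (str.find finds '' at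
-- index len(input), one past the result array); A returns normally on everything else.
def Pre_find (input : String) (strings : List String) : Prop := "" ∉ strings
instance (input : String) (strings : List String) : Decidable (Pre_find input strings) := by
  unfold Pre_find; infer_instance

def pvWitness_find : String × List String := ("abcbc", ["ab", "bc", "c"])

def Spec_find (input : String) (strings : List String) (out : List String) : Prop :=
  out = find_alt input strings
instance (input : String) (strings : List String) (out : List String) :
    Decidable (Spec_find input strings out) := by unfold Spec_find; infer_instance

-- ===== CLAIM (what is proved, stated in full; the proofs are below) =====
def Claim_equal_find : Prop := ∀ (input : String) (strings : List String),
  Dom_find input strings → Pre_find input strings → Spec_find input strings (find input strings)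

-- ===== LEMMAS AND PROOFS =====

lemma sw_eq (a b : List Char) : PySem.Chars.startswith a b = decide (b <+: a) := by
  by_cases h : b <+: a
  · simp [h, (PySem.Chars.startswith_iff a b).mpr h]
  · simp only [h, decide_false]
    cases hb : PySem.Chars.startswith a b
    · rfl
    · exact absurd ((PySem.Chars.startswith_iff a b).mp hb) h

lemma prefix_drop_lt {cs inp : List Char} {p : Nat}
    (h : cs <+: inp.drop p) (hne : cs ≠ []) : p < inp.length := by
  by_contra hp
  have hd : inp.drop p = [] := List.drop_eq_nil_of_le (by omega)
  rw [hd, List.prefix_nil] at h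
  exact hne h

lemma findLoop_length (inp cs : List Char) (str : String) :
    ∀ (fuel i : Nat) (result : List (Option String)),
      (findLoop inp cs str result i fuel).length = result.length := by
  intro fuel
  induction fuel with
  | zero => intro i result; rfl
  | succ n ih =>
    intro i result
    rw [findLoop]
    split
    · rfl
    · rw [ih]; exact List.length_set ..

lemma findLoop_getElem? (inp cs : List Char) (str : String) (hcs : cs ≠ []) :
    ∀ (fuel i : Nat) (result : List (Option String)),
      i ≤ inp.length → inp.length + 1 ≤ fuel + i → result.length = inp.length →
      ∀ p, (findLoop inp cs str result i fuel)[p]? =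
        if i ≤ p ∧ cs <+: inp.drop p then some (some str) else result[p]? := by
  intro fuel
  induction fuel with
  | zero => intro i result hi hf hlen p; omega
  | succ n ih =>
    intro i result hi hf hlen p
    rw [findLoop]
    by_cases hneg : PySem.Chars.findFrom inp cs (i : Int) none < 0
    · rw [if_pos hneg]
      have hm1 : PySem.Chars.findFrom inp cs (i : Int) none = -1 := by
        rw [PySem.Chars.findFrom_natCast inp cs i hi] at hneg ⊢
        by_cases hfind : PySem.Chars.find (inp.drop i) cs = -1
        · rw [if_pos hfind]
        · rw [if_neg hfind] at hneg ⊢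
          have h1 := PySem.Chars.neg_one_le_find (inp.drop i) cs
          omega
      have hnone : ¬ cs <:+: inp.drop i :=
        (PySem.Chars.findFrom_natCast_eq_neg_one_iff inp cs i hi).mp hm1
      have hcond : ¬ (i ≤ p ∧ cs <+: inp.drop p) := by
        rintro ⟨hip, hpre⟩
        apply hnone
        obtain ⟨v, hv⟩ := hpre
        have h1 : (inp.drop i).drop (p - i) = inp.drop p := by
          rw [List.drop_drop]; congr 1; omega
        refine ⟨(inp.drop i).take (p - i), v, ?_⟩
        rw [List.append_assoc, hv, ← h1, List.take_append_drop]
      rw [if_neg hcond]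
    · rw [if_neg hneg]
      have hne1 : PySem.Chars.findFrom inp cs (i : Int) none ≠ -1 := by omega
      obtain ⟨hle, hpre, hmin⟩ := PySem.Chars.findFrom_natCast_spec inp cs i hi hne1
      have hidxlt : (PySem.Chars.findFrom inp cs (i : Int) none).toNat < inp.length :=
        prefix_drop_lt hpre hcs
      have hile : i ≤ (PySem.Chars.findFrom inp cs (i : Int) none).toNat := by omega
      rw [ih ((PySem.Chars.findFrom inp cs (i : Int) none).toNat + 1)
          (result.set (PySem.Chars.findFrom inp cs (i : Int) none).toNat (some str))
          (by omega) (by omega) (by rw [List.length_set]; exact hlen)]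
      by_cases hc2 : (PySem.Chars.findFrom inp cs (i : Int) none).toNat + 1 ≤ p ∧ cs <+: inp.drop p
      · rw [if_pos hc2, if_pos ⟨by omega, hc2.2⟩]
      · rw [if_neg hc2]
        by_cases hpi : p = (PySem.Chars.findFrom inp cs (i : Int) none).toNat
        · subst hpi
          rw [List.getElem?_set_self (by omega), if_pos ⟨hile, hpre⟩]
        · rw [List.getElem?_set_ne (fun h => hpi h.symm)]
          have : ¬ (i ≤ p ∧ cs <+: inp.drop p) := by
            rintro ⟨hip, hppre⟩
            have hplt : p < (PySem.Chars.findFrom inp cs (i : Int) none).toNat := by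
              rcases Nat.lt_or_ge p ((PySem.Chars.findFrom inp cs (i : Int) none).toNat + 1) with h | h
              · omega
              · exact absurd ⟨h, hppre⟩ hc2
            exact hmin p hip hplt hppre
          rw [if_neg this]

-- A's outer for-loop: the final array, read back position by position
lemma fold_getElem? (inp : List Char) :
    ∀ (L : List String) (result : List (Option String)),
      result.length = inp.length → (∀ s ∈ L, s.toList ≠ []) →
      ∀ p, (L.foldl (fun r c => findLoop inp c.toList c r 0 (inp.length + 2)) result)[p]? =
        ((L.reverse.find? (fun s => decide (s.toList <+: inp.drop p))).map some).or result[p]? := by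
  intro L
  induction L with
  | nil => intro result hlen hne p; simp
  | cons s L ih =>
    intro result hlen hne p
    rw [List.foldl_cons]
    rw [ih _ (by rw [findLoop_length]; exact hlen) (fun t ht => hne t (List.mem_cons_of_mem s ht)) p]
    rw [findLoop_getElem? inp s.toList s (hne s (List.mem_cons_self ..)) (inp.length + 2) 0 result
        (by omega) (by omega) hlen p]
    rw [List.reverse_cons, List.find?_append]
    rw [Option.map_or, Option.or_assoc]
    congr 1
    simp only [List.find?_cons, List.find?_nil]
    by_cases h : s.toList <+: inp.drop p
    · simp [h]
    · simp [h]

-- ===== VERDICT (by name: the statement is the Claim_ definition above) =====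
theorem find_spec : Claim_equal_find := by
  intro input strings _hdom hpre
  unfold Spec_find find find_alt
  generalize input.toList = inp
  have hne : ∀ s ∈ strings, s.toList ≠ [] := by
    intro s hs h
    exact hpre (String.toList_eq_nil_iff.mp h ▸ hs)
  have hfin : (strings.foldl
      (fun result check_str => findLoop inp check_str.toList check_str result 0 (inp.length + 2))
      ((List.range inp.length).map (fun _ => none)))
      = (List.range inp.length).map
          (fun p => strings.reverse.find? (fun s => decide (s.toList <+: inp.drop p))) := by
    apply List.ext_getElem?
    intro p
    rw [fold_getElem? inp strings _ (by simp) hne p]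
    by_cases hp : p < inp.length
    · have h0 : ((List.range inp.length).map (fun _ => (none : Option String)))[p]? = some none := by
        simp [hp]
      rw [h0]
      have hgm : ((List.range inp.length).map
          (fun p => strings.reverse.find? (fun s => decide (s.toList <+: inp.drop p))))[p]?
          = some (strings.reverse.find? (fun s => decide (s.toList <+: inp.drop p))) := by
        simp [hp]
      rw [hgm]
      cases strings.reverse.find? (fun s => decide (s.toList <+: inp.drop p)) <;> rfl
    · have hF : strings.reverse.find? (fun s => decide (s.toList <+: inp.drop p)) = none := by
        rw [List.find?_eq_none]
        intro s hs
        simp only [decide_eq_true_eq]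
        intro hpre'
        exact hp (prefix_drop_lt hpre' (hne s (List.mem_reverse.mp hs)))
      rw [hF]
      have h1 : ((List.range inp.length).map (fun _ => (none : Option String)))[p]? = none := by
        rw [List.getElem?_eq_none]; simpa using (by omega : inp.length ≤ p)
      have h2 : ((List.range inp.length).map
          (fun p => strings.reverse.find? (fun s => decide (s.toList <+: inp.drop p))))[p]? = none := by
        rw [List.getElem?_eq_none]; simpa using (by omega : inp.length ≤ p)
      rw [h1, h2]; rfl
  rw [hfin, List.filterMap_map]
  apply List.filterMap_congr
  intro p _hp
  simp only [Function.comp, sw_eq]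
  cases hfp : strings.reverse.find? (fun s => decide (s.toList <+: inp.drop p)) with
  | none => rfl
  | some s =>
    have hs : s.toList ≠ [] := hne s (List.mem_reverse.mp (List.mem_of_find?_eq_some hfp))
    simp [hs]
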